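-- pv_equiv track=rewrite | github.com/ne0gl1tch20/notepadclone | src/pypad/ui/ai/ai_controller.py | _split_for_live_ui
-- ===== SOURCE A (Python) =====
-- from collections.abc import Callable, Iterator
--
-- def _split_for_live_ui(text: str) -> Iterator[str]:
--     words = text.split()
--     if not words:
--         return
--     chunk: list[str] = []
--     size = 0
--     for word in words:
--         add_size = len(word) + (1 if chunk else 0)
--         if size + add_size > 24 and chunk:
--             yield " ".join(chunk) + " "
--             chunk = [word]
--             size = len(word)
--             continue
--         chunk.append(word)
--         size += add_size
--     if chunk:
--         yield " ".join(chunk)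
-- ===== SOURCE B (Python) =====
-- def _split_for_live_ui(text):
--     # Prefix sums + two-pointer index scan: no running chunk list, chunks are
--     # slices of words; trailing space added positionally in a second pass.
--     words = text.split()
--     n = len(words)
--     pref = [0] * (n + 1)
--     for i, w in enumerate(words):
--         pref[i + 1] = pref[i] + len(w) + 1
--     # cost of " ".join(words[i:j]) is pref[j] - pref[i] - 1
--     out = []
--     i = 0
--     while i < n:
--         j = i + 1
--         while j < n and pref[j + 1] - pref[i] - 1 <= 24:
--             j += 1
--         out.append(" ".join(words[i:j]))
--         i = j
--     for k, line in enumerate(out):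
--         yield line + (" " if k < len(out) - 1 else "")
-- ===== Notes on version B (the rewrite author's own statement) =====
-- stated objective: alternative
-- what changed: A streams a growing chunk list with a running size and yields on flush; B precomputes a prefix-sum array of word costs, finds each chunk boundary with a two-pointer scan over indices (chunks are slices of the word list, never accumulated), and a second positional pass appends the trailing space to every line but the last.
import Mathlib
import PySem

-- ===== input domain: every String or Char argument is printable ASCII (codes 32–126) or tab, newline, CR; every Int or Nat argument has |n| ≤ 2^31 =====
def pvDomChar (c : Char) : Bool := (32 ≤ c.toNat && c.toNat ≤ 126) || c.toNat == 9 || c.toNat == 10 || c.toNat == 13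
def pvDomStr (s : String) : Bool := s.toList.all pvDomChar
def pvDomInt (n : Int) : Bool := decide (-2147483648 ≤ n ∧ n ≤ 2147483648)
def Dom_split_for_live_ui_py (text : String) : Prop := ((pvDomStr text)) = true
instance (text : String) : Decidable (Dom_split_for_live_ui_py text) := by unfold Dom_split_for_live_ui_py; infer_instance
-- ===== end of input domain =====

-- B replaces A's streaming chunk-accumulator with a prefix-sum array, a two-pointer
-- index scan extracting chunks as slices, and a positional emission pass (objective: alternative).

-- ===== PORT A =====
-- the 'for word in words' loop of A, carried state (chunk, size), yields accumulated in acc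
def pvALoop (ws : List String) (chunk : List String) (size : Int) (acc : List String) : List String :=
  match ws with
  | [] => if chunk ≠ [] then acc ++ [PySem.Str.join " " chunk] else acc
  | w :: rest =>
    let addSize : Int := (PySem.Str.len w : Int) + (if chunk ≠ [] then 1 else 0)
    if size + addSize > 24 ∧ chunk ≠ [] then
      pvALoop rest [w] (PySem.Str.len w) (acc ++ [PySem.Str.join " " chunk ++ " "])
    else
      pvALoop rest (chunk ++ [w]) (size + addSize) acc

def split_for_live_ui_py (text : String) : List String :=
  let words := PySem.Str.split₀ text
  if words = [] then [] else pvALoop words [] 0 []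

-- ===== PORT B =====
-- pref[i+1] = pref[i] + len(w) + 1, built left to right
def pvPref (ws : List String) : List Int :=
  ws.foldl (fun p w => p ++ [p.getLast! + (PySem.Str.len w : Int) + 1]) [0]

-- the inner 'while j < n and pref[j+1] - pref[i] - 1 <= 24: j += 1' loop
def pvInner (pref : List Int) (n i j : Nat) : Nat :=
  if j < n ∧ pref.getD (j + 1) 0 - pref.getD i 0 - 1 ≤ 24 then
    pvInner pref n i (j + 1)
  else j
termination_by n - j
decreasing_by omega

-- needed by pvOuter's termination (the outer index strictly advances)
theorem pvInner_ge (pref : List Int) (n i : Nat) : ∀ m j, n - j ≤ m → j ≤ pvInner pref n i j := by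
  intro m
  induction m with
  | zero =>
    intro j h; unfold pvInner; split
    · next hc => omega
    · exact Nat.le_refl j
  | succ m ih =>
    intro j h; unfold pvInner; split
    · next hc => have := ih (j + 1) (by omega); omega
    · exact Nat.le_refl j

-- the outer 'while i < n' loop: find the chunk boundary, append the joined slice
def pvOuter (words : List String) (pref : List Int) (n i : Nat) (out : List String) : List String :=
  if _h : i < n then
    let j := pvInner pref n i (i + 1)
    pvOuter words pref n j
      (out ++ [PySem.Str.join " " (PySem.List.slice words (some (i : Int)) (some (j : Int)))])
  else out
termination_by n - i
decreasing_by
  have := pvInner_ge pref n i (n - (i + 1)) (i + 1) (Nat.le_refl _)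
  omega

def split_for_live_ui_py_alt (text : String) : List String :=
  let words := PySem.Str.split₀ text
  let n := words.length
  let pref := pvPref words
  let out := pvOuter words pref n 0 []
  (PySem.List.enumerate out 0).map
    (fun p => p.2 ++ (if p.1 < (out.length : Int) - 1 then " " else ""))

-- ===== PRECONDITION & SPEC =====
def Spec_split_for_live_ui_py (text : String) (out : List String) : Prop := out = split_for_live_ui_py_alt text
instance (text : String) (out : List String) : Decidable (Spec_split_for_live_ui_py text out) := by unfold Spec_split_for_live_ui_py; infer_instance

-- ===== CLAIM (what is proved, stated in full; the proofs are below) =====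
def Claim_equal_split_for_live_ui_py : Prop := ∀ (text : String), Dom_split_for_live_ui_py text → Spec_split_for_live_ui_py text (split_for_live_ui_py text)

-- ===== LEMMAS AND PROOFS =====

-- canonical greedy partition (proof meeting point of both ports)
def pvGroupsRec (ws : List String) (cur : List String) (size : Int) : List (List String) :=
  match ws with
  | [] => [cur]
  | w :: rest =>
    if size + 1 + (PySem.Str.len w : Int) > 24 then
      cur :: pvGroupsRec rest [w] (PySem.Str.len w)
    else
      pvGroupsRec rest (cur ++ [w]) (size + 1 + (PySem.Str.len w : Int))

def pvGpart (ws : List String) : List (List String) :=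
  match ws with
  | [] => []
  | w :: rest => pvGroupsRec rest [w] (PySem.Str.len w)

-- A's emission of a group list: trailing space on all but the last group
def pvEmit (gs : List (List String)) : List String :=
  match gs with
  | [] => []
  | [g] => [PySem.Str.join " " g]
  | g :: rest => (PySem.Str.join " " g ++ " ") :: pvEmit rest

-- same, over already-joined lines
def pvEmitS (xs : List String) : List String :=
  match xs with
  | [] => []
  | [x] => [x]
  | x :: rest => (x ++ " ") :: pvEmitS rest

-- joined cost of a word list plus one joiner each
def pvC (l : List String) : Int := (l.map (fun w => (PySem.Str.len w : Int) + 1)).sum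

theorem pvGroupsRec_ne_nil (ws cur size) : pvGroupsRec ws cur size ≠ [] := by
  induction ws generalizing cur size with
  | nil => simp [pvGroupsRec]
  | cons w rest ih =>
    simp only [pvGroupsRec]
    split
    · simp
    · exact ih _ _

theorem pvEmit_cons (g : List String) (gs : List (List String)) (h : gs ≠ []) :
    pvEmit (g :: gs) = (PySem.Str.join " " g ++ " ") :: pvEmit gs := by
  cases gs with
  | nil => exact absurd rfl h
  | cons a t => rfl

theorem pvALoop_eq (ws cur size acc) (h : cur ≠ []) :
    pvALoop ws cur size acc = acc ++ pvEmit (pvGroupsRec ws cur size) := by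
  induction ws generalizing cur size acc with
  | nil => simp [pvALoop, pvGroupsRec, pvEmit, h]
  | cons w rest ih =>
    have hEq : size + ((PySem.Str.len w : Int) + 1) = size + 1 + (PySem.Str.len w : Int) := by ring
    simp only [pvALoop, pvGroupsRec, h, ne_eq, not_false_eq_true, if_true, and_true]
    rw [hEq]
    split
    · rw [ih [w] _ _ (by simp), pvEmit_cons _ _ (pvGroupsRec_ne_nil _ _ _)]
      simp
    · exact ih _ _ _ (by simp)

-- ---- prefix-sum characterisation ----
def pvScan (s : Int) : List String → List Int
  | [] => []
  | w :: rest => (s + (PySem.Str.len w : Int) + 1) :: pvScan (s + (PySem.Str.len w : Int) + 1) rest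

theorem pvPref_foldl (ws : List String) :
    ∀ (p : List Int), p ≠ [] →
      ws.foldl (fun p w => p ++ [p.getLast! + (PySem.Str.len w : Int) + 1]) p
        = p ++ pvScan p.getLast! ws := by
  induction ws with
  | nil => intro p _; simp [pvScan]
  | cons w rest ih =>
    intro p hp
    simp only [List.foldl_cons, pvScan]
    rw [ih _ (by simp)]
    have hlast : (p ++ [p.getLast! + (PySem.Str.len w : Int) + 1]).getLast!
        = p.getLast! + (PySem.Str.len w : Int) + 1 := by
      rw [List.getLast!_eq_getLast?_getD]; simp
    rw [hlast]
    simp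

theorem pvPref_eq (ws : List String) : pvPref ws = 0 :: pvScan 0 ws := by
  unfold pvPref
  rw [pvPref_foldl ws [0] (by simp)]
  simp [List.getLast!]

theorem pvScan_getD (ws : List String) :
    ∀ (k : Nat) (s : Int), k ≤ ws.length → (s :: pvScan s ws).getD k 0 = s + pvC (ws.take k) := by
  induction ws with
  | nil =>
    intro k s hk
    have hk0 : k = 0 := by simpa using hk
    subst hk0
    simp [pvC]
  | cons w rest ih =>
    intro k s hk
    cases k with
    | zero => simp [pvC]
    | succ k =>
      simp only [pvScan, List.getD_cons_succ]
      have := ih k (s + (PySem.Str.len w : Int) + 1) (by simpa using hk)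
      rw [this]
      simp [pvC]
      ring

theorem pvPref_getD (ws : List String) (k : Nat) (hk : k ≤ ws.length) :
    (pvPref ws).getD k 0 = pvC (ws.take k) := by
  rw [pvPref_eq, pvScan_getD ws k 0 hk, zero_add]

theorem pvC_take_succ (ws : List String) (j : Nat) (hj : j < ws.length) :
    pvC (ws.take (j + 1)) = pvC (ws.take j) + (PySem.Str.len ws[j] : Int) + 1 := by
  rw [show ws.take (j + 1) = ws.take j ++ [ws[j]] from by
    rw [List.take_add_one, List.getElem?_eq_getElem hj]; rfl]
  unfold pvC
  rw [List.map_append, List.sum_append]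
  simp only [List.map_cons, List.map_nil, List.sum_cons, List.sum_nil]
  ring

-- ---- inner loop = one greedy chunk ----
theorem pvInner_le (pref : List Int) (n i : Nat) :
    ∀ m j, n - j ≤ m → j ≤ n → pvInner pref n i j ≤ n := by
  intro m
  induction m with
  | zero =>
    intro j h hj; unfold pvInner; split
    · next hc => omega
    · exact hj
  | succ m ih =>
    intro j h hj; unfold pvInner; split
    · next hc => exact ih (j + 1) (by omega) (by omega)
    · exact hj

theorem pvInner_chunk (words : List String) (i : Nat) :
    ∀ m j, i < j → j ≤ words.length → words.length - j ≤ m →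
      pvGroupsRec (words.drop j) ((words.drop i).take (j - i))
          (pvC (words.take j) - pvC (words.take i) - 1)
        = (words.drop i).take (pvInner (pvPref words) words.length i j - i)
            :: pvGpart (words.drop (pvInner (pvPref words) words.length i j)) := by
  intro m
  induction m with
  | zero =>
    intro j hij hjn hm
    have hjn' : j = words.length := by omega
    subst hjn'
    unfold pvInner
    rw [if_neg (by omega)]
    simp [pvGroupsRec, pvGpart]
  | succ m ih =>
    intro j hij hjn hm
    by_cases hjlt : j < words.length
    · have hdrop : words.drop j = words[j] :: words.drop (j + 1) :=
        List.drop_eq_getElem_cons hjlt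
      have hpref : (pvPref words).getD (j + 1) 0 - (pvPref words).getD i 0 - 1
          = pvC (words.take (j + 1)) - pvC (words.take i) - 1 := by
        rw [pvPref_getD words (j + 1) (by omega), pvPref_getD words i (by omega)]
      have hsucc := pvC_take_succ words j hjlt
      by_cases h24 : pvC (words.take (j + 1)) - pvC (words.take i) - 1 ≤ 24
      · -- inner loop advances; greedy keeps the word in the chunk
        have hstep : pvInner (pvPref words) words.length i j
            = pvInner (pvPref words) words.length i (j + 1) := by
          rw [pvInner]
          rw [if_pos ⟨hjlt, by rw [hpref]; exact h24⟩]
        have htake : (words.drop i).take (j - i) ++ [words[j]]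
            = (words.drop i).take (j + 1 - i) := by
          have hlt : j - i < (words.drop i).length := by
            rw [List.length_drop]; omega
          have : (words.drop i)[j - i] = words[j] := by
            rw [List.getElem_drop]
            congr 1; omega
          rw [show j + 1 - i = (j - i) + 1 by omega, List.take_add_one,
              List.getElem?_eq_getElem hlt, this]
          rfl
        rw [hdrop, hstep]
        simp only [pvGroupsRec]
        rw [if_neg (by omega)]
        rw [htake, show pvC (words.take j) - pvC (words.take i) - 1 + 1
              + (PySem.Str.len words[j] : Int)
            = pvC (words.take (j + 1)) - pvC (words.take i) - 1 by omega]
        exact ih (j + 1) (by omega) (by omega) (by omega)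
      · -- inner loop stops here; greedy starts a new chunk
        have hstop : pvInner (pvPref words) words.length i j = j := by
          rw [pvInner]
          rw [if_neg (by rw [hpref]; omega)]
        rw [hstop, hdrop]
        simp only [pvGroupsRec]
        rw [if_pos (by omega)]
        rw [show pvGpart (words[j] :: words.drop (j + 1))
            = pvGroupsRec (words.drop (j + 1)) [words[j]] (PySem.Str.len words[j]) from rfl]
    · have hjn' : j = words.length := by omega
      subst hjn'
      unfold pvInner
      rw [if_neg (by omega)]
      simp [pvGroupsRec, pvGpart]

-- ---- outer loop = map join over the greedy partition ----
theorem pvOuter_eq (words : List String) :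
    ∀ m i acc, i ≤ words.length → words.length - i ≤ m →
      pvOuter words (pvPref words) words.length i acc
        = acc ++ (pvGpart (words.drop i)).map (PySem.Str.join " ") := by
  intro m
  induction m with
  | zero =>
    intro i acc hi hm
    have : i = words.length := by omega
    subst this
    unfold pvOuter
    rw [dif_neg (by omega)]
    simp [pvGpart]
  | succ m ih =>
    intro i acc hi hm
    by_cases hilt : i < words.length
    · set j := pvInner (pvPref words) words.length i (i + 1) with hj
      have hge : i + 1 ≤ j := pvInner_ge _ _ _ (words.length - (i + 1)) (i + 1) (Nat.le_refl _)
      have hle : j ≤ words.length := pvInner_le _ _ _ (words.length - (i + 1)) (i + 1) (Nat.le_refl _) (by omega)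
      have hdropi : words.drop i = words[i] :: words.drop (i + 1) :=
        List.drop_eq_getElem_cons hilt
      have hchunk := pvInner_chunk words i (words.length - (i + 1)) (i + 1) (by omega) (by omega) (Nat.le_refl _)
      rw [← hj] at hchunk
      have hone : (words.drop i).take (i + 1 - i) = [words[i]] := by
        rw [hdropi, show i + 1 - i = 1 by omega]
        rfl
      have hsize : pvC (words.take (i + 1)) - pvC (words.take i) - 1
          = (PySem.Str.len words[i] : Int) := by
        rw [pvC_take_succ words i hilt]; ring
      rw [hone, hsize] at hchunk
      have hgp : pvGpart (words.drop i)
          = (words.drop i).take (j - i) :: pvGpart (words.drop j) := by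
        conv_lhs => rw [hdropi]
        exact hchunk
      unfold pvOuter
      rw [dif_pos hilt]
      rw [ih j _ hle (by omega)]
      rw [hgp]
      simp only [List.map_cons, PySem.List.slice_natCast]
      rw [List.append_assoc]
      rfl
    · have : i = words.length := by omega
      subst this
      unfold pvOuter
      rw [dif_neg (by omega)]
      simp [pvGpart]

-- ---- emission pass ----
theorem pvEnum_emit (xs : List String) :
    ∀ (s L : Int), L = s + xs.length →
      (PySem.List.enumerate xs s).map (fun p => p.2 ++ (if p.1 < L - 1 then " " else "")) = pvEmitS xs := by
  induction xs with
  | nil => intro s L _; simp [PySem.List.enumerate_nil, pvEmitS]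
  | cons x t ih =>
    intro s L hL
    rw [PySem.List.enumerate_cons]
    cases t with
    | nil =>
      simp only [List.length_cons, List.length_nil] at hL
      simp [pvEmitS, PySem.List.enumerate_nil, hL]
    | cons y t' =>
      simp only [List.map_cons]
      rw [ih (s + 1) L (by simp only [List.length_cons] at hL ⊢; push_cast at hL ⊢; omega)]
      have hlt : s < L - 1 := by
        simp only [List.length_cons] at hL
        push_cast at hL
        omega
      rw [if_pos hlt]
      rfl

theorem pvEmitS_map_join (gs : List (List String)) :
    pvEmitS (gs.map (PySem.Str.join " ")) = pvEmit gs := by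
  induction gs with
  | nil => rfl
  | cons g t ih =>
    cases t with
    | nil => rfl
    | cons b t' =>
      show (PySem.Str.join " " g ++ " ") :: pvEmitS ((b :: t').map (PySem.Str.join " "))
          = pvEmit (g :: b :: t')
      rw [ih, pvEmit_cons g (b :: t') (by simp)]

-- ===== VERDICT (by name: the statement is the Claim_ definition above) =====
theorem split_for_live_ui_py_spec : Claim_equal_split_for_live_ui_py := by
  intro text _
  unfold Spec_split_for_live_ui_py split_for_live_ui_py split_for_live_ui_py_alt
  cases hw : PySem.Str.split₀ text with
  | nil =>
    simp [show pvOuter [] (pvPref []) 0 0 [] = [] from by unfold pvOuter; rw [dif_neg (by omega)],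
      PySem.List.enumerate_nil]
  | cons w rest =>
    simp only [if_neg (by simp : ¬(w :: rest = []))]
    rw [pvOuter_eq (w :: rest) (w :: rest).length 0 [] (by omega) (by omega)]
    simp only [List.drop_zero, List.nil_append]
    have hemit := pvEnum_emit ((pvGpart (w :: rest)).map (PySem.Str.join " ")) 0
      ((((pvGpart (w :: rest)).map (PySem.Str.join " ")).length : Int)) (by simp)
    rw [pvEmitS_map_join] at hemit
    have h1 : pvALoop (w :: rest) [] 0 [] = pvALoop rest [w] ((PySem.Str.len w : Int)) [] := by
      simp [pvALoop]
    rw [h1, pvALoop_eq _ _ _ _ (by simp), List.nil_append]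
    exact hemit.symm
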